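-- pv_equiv track=rewrite | github.com/devyuseon/problem-solving | boj/2628.py | solution
-- ===== SOURCE A (Python) =====
-- def solution(k, li):
--     tmp = []
--     prev = 0
--     for i in range(1, k + 1):
--         if li[i] == 1:
--             tmp.append(i - prev)
--             prev = i
--     return tmp
-- ===== SOURCE B (Python) =====
-- def solution(k, li):
--     positions = [i for i in range(1, k + 1) if li[i] == 1]
--     return [b - a for a, b in zip([0] + positions, positions)]
-- ===== Notes on version B (the rewrite author's own statement) =====
-- stated objective: alternative
-- what changed: Replaced the single stateful scan carrying a prev accumulator by two stateless passes: collect the marked positions, then pair each with its predecessor (virtual leading 0) via zip and take differences.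
import Mathlib
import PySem

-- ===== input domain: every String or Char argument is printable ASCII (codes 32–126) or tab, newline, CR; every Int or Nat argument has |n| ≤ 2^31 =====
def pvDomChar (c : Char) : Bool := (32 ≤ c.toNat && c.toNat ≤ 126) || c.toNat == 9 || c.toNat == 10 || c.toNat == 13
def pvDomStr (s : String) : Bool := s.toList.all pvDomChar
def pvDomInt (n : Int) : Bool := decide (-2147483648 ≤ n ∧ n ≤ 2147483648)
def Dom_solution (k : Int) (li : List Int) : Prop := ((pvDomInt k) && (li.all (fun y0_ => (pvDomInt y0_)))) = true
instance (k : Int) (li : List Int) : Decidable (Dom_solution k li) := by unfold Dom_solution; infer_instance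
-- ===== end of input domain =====

-- B replaces A's single stateful scan (prev accumulator) by two stateless passes:
-- collect marked positions, then zip with a 0-prefixed copy and subtract (objective: alternative).


-- ===== PORT A =====
-- li[i]: exact under Pre_solution (every visited index is in range; Python would raise otherwise)
def solution (k : Int) (li : List Int) : List Int :=
  (PySem.List.pyRange 1 (k + 1) 1).foldl
    (fun (s : List Int × Int) i =>
      if (PySem.List.pyGet? li i).getD 0 = 1 then (s.1 ++ [i - s.2], i) else s)
    ([], 0) |>.1

-- ===== PORT B =====
def solution_alt (k : Int) (li : List Int) : List Int :=
  let positions := (PySem.List.pyRange 1 (k + 1) 1).filter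
      (fun i => (PySem.List.pyGet? li i).getD 0 = 1)
  List.zipWith (fun a b => b - a) (0 :: positions) positions

-- ===== PRECONDITION & SPEC =====
-- Pre_ excludes exactly the inputs where A (and B) raise IndexError: k ≥ 1 with li shorter than k+1.
def Pre_solution (k : Int) (li : List Int) : Prop := k ≤ 0 ∨ k < (li.length : Int)
instance (k : Int) (li : List Int) : Decidable (Pre_solution k li) := by unfold Pre_solution; infer_instance
def pvWitness_solution : Int × List Int := (3, [5, 1, 0, 1])

def Spec_solution (k : Int) (li : List Int) (out : List Int) : Prop := out = solution_alt k li
instance (k : Int) (li : List Int) (out : List Int) : Decidable (Spec_solution k li out) := by unfold Spec_solution; infer_instance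

-- ===== CLAIM (what is proved, stated in full; the proofs are below) =====
def Claim_equal_solution : Prop := ∀ (k : Int) (li : List Int), Dom_solution k li → Pre_solution k li → Spec_solution k li (solution k li)

-- ===== LEMMAS AND PROOFS =====

-- consecutive gaps of a position list, given the previous position
def pvGaps (prev : Int) : List Int → List Int
  | [] => []
  | p :: rest => (p - prev) :: pvGaps p rest

theorem pvZip_eq_gaps (ps : List Int) : ∀ prev : Int,
    List.zipWith (fun a b => b - a) (prev :: ps) ps = pvGaps prev ps := by
  induction ps with
  | nil => intro prev; rfl
  | cons p rest ih => intro prev; simp [pvGaps, List.zipWith, ih p]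

theorem pvFold_eq_gaps (pred : Int → Bool) (xs : List Int) : ∀ (acc : List Int) (prev : Int),
    (xs.foldl (fun (s : List Int × Int) i =>
        if pred i = true then (s.1 ++ [i - s.2], i) else s) (acc, prev)).1
      = acc ++ pvGaps prev (xs.filter pred) := by
  induction xs with
  | nil => intro acc prev; simp [pvGaps]
  | cons x rest ih =>
      intro acc prev
      by_cases h : pred x = true
      · simp [h, ih, pvGaps]
      · simp [h, ih]

-- ===== VERDICT (by name: the statement is the Claim_ definition above) =====
theorem solution_spec : Claim_equal_solution := by
  intro k li _ _
  unfold Spec_solution solution solution_alt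
  rw [pvZip_eq_gaps]
  have := pvFold_eq_gaps (fun i => decide ((PySem.List.pyGet? li i).getD 0 = 1))
      (PySem.List.pyRange 1 (k + 1) 1) [] 0
  simpa using this
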